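-- pv_equiv track=rewrite | github.com/yukiyokochi/TheftJudge | theftjudge.py | StepThree
-- ===== SOURCE A (Python) =====
-- def StepThree(input_sequence):
--     # f1,i2,#,c2,e1を抽出して、それを逆にしてf1かi2が出てきた段階で切る。それを再び逆にして、結果的にどうなるかを着目したリストを作る。
--     # 最初は必ずf1かi2なのでcount2=1。
--     # ##(長い時間がたった場合)が出てきていないのにc2が出てきたらダメなので、'#'が出てきたらその分だけ-1、c2が出てきたら+1とする。
--     #また、c2の直後にe1が出てきたら陰性を返す、count2が+のままなら陽性。
--     output_sequence = []
--     for unitact in input_sequence: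
--         if unitact == 'f1' or unitact == 'i2' or unitact == '#' or unitact == 'c2' or unitact == 'e1':
--             output_sequence.append(unitact)
--     output_sequence2 = []
--     count = 0
--     output_sequence_rv = output_sequence[::-1]
--     for unit_output in output_sequence_rv:
--         if count == 0 and unit_output == 'f1':
--             count += 1
--             output_sequence2.append(unit_output)
--         elif count == 0 and unit_output == 'i2':
--             count += 1
--             output_sequence2.append(unit_output)
--         elif count == 0:
--             output_sequence2.append(unit_output)
--         elif count >= 1:
--             pass
--     output_sequence2 = output_sequence2[::-1]
--     count2 = 1
--     for output_sequence2_unit in output_sequence2: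
--         if output_sequence2_unit == '#':
--             count2 = count2 - 1
--         elif output_sequence2_unit == 'c2':
--             count2 = count2 + 1
--     if count2 >= 1:
--         if 'c2' in output_sequence2 and output_sequence2[-1] != 'c2' and output_sequence2[int(output_sequence2.index('c2')) + 1] == 'e1':
--             return 0
--         else:
--             return 1
--     else:
--         return 0
-- ===== SOURCE B (Python) =====
-- def StepThree(input_sequence):
--     # Single forward pass: reset per-segment state at each 'f1'/'i2' instead of
--     # filter + reverse + cut + reverse + rescan.
--     count2 = 1          # 1, minus one per '#', plus one per 'c2' in the segment
--     has_c2 = False      # a 'c2' occurred in the segment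
--     after_c2 = None     # the token immediately after the first 'c2' of the segment
--     last = None         # last relevant token of the segment
--     for tok in input_sequence:
--         if tok == 'f1' or tok == 'i2':
--             count2, has_c2, after_c2, last = 1, False, None, tok
--         elif tok == '#' or tok == 'c2' or tok == 'e1':
--             if has_c2 and after_c2 is None:
--                 after_c2 = tok
--             if tok == '#':
--                 count2 -= 1
--             elif tok == 'c2':
--                 count2 += 1
--                 has_c2 = True
--             last = tok
--     if count2 >= 1:
--         if has_c2 and last != 'c2' and after_c2 == 'e1':
--             return 0
--         return 1
--     return 0
-- ===== Notes on version B (the rewrite author's own statement) =====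
-- stated objective: simpler
-- what changed: Replaced A's five-stage pipeline (filter, reverse, stateful cut at the first marker, reverse again, rescan plus membership/index/last lookups) by a single forward pass that resets per-segment state at each 'f1'/'i2' and tracks the running count, whether a 'c2' occurred, the token right after the first 'c2', and the last token.
import Mathlib
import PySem

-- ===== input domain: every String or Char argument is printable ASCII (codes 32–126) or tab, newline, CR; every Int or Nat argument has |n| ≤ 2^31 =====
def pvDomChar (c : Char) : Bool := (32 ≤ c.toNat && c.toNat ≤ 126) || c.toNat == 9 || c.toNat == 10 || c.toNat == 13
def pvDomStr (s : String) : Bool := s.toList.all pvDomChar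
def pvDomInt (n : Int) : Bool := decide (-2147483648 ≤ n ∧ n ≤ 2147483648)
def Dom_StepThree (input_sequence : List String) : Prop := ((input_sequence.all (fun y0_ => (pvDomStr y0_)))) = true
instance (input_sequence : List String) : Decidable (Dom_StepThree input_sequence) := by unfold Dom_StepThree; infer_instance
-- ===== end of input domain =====

-- B replaces A's filter + reverse + cut + reverse + rescan by one forward pass that
-- resets per-segment state at each 'f1'/'i2' (objective: simpler, one traversal).

-- ===== PORT A =====
def pvRel (u : String) : Bool := u == "f1" || u == "i2" || u == "#" || u == "c2" || u == "e1"

def pvStepA (st : Int × List String) (u : String) : Int × List String :=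
  if st.1 = 0 ∧ u = "f1" then (st.1 + 1, st.2 ++ [u])
  else if st.1 = 0 ∧ u = "i2" then (st.1 + 1, st.2 ++ [u])
  else if st.1 = 0 then (st.1, st.2 ++ [u])
  else st

def StepThree (input_sequence : List String) : Int :=
  let output_sequence :=
    input_sequence.foldl (fun acc u => if pvRel u then acc ++ [u] else acc) ([] : List String)
  let output_sequence_rv := (PySem.List.slice? output_sequence none none (-1)).getD []
  let r := output_sequence_rv.foldl pvStepA ((0 : Int), ([] : List String))
  let output_sequence2 := (PySem.List.slice? r.2 none none (-1)).getD []
  let count2 := output_sequence2.foldl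
    (fun c u => if u = "#" then c - 1 else if u = "c2" then c + 1 else c) (1 : Int)
  if count2 ≥ 1 then
    if "c2" ∈ output_sequence2 ∧ PySem.List.pyGet? output_sequence2 (-1) ≠ some "c2" ∧
        ((PySem.List.index? output_sequence2 "c2").bind
          (fun i => PySem.List.pyGet? output_sequence2 ((i : Int) + 1))) = some "e1"
    then 0 else 1
  else 0

-- ===== PORT B =====
def pvStepB (st : Int × Bool × Option String × Option String) (tok : String) :
    Int × Bool × Option String × Option String :=
  if tok = "f1" ∨ tok = "i2" then (1, false, none, some tok)
  else if tok = "#" ∨ tok = "c2" ∨ tok = "e1" then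
    let after := if st.2.1 = true ∧ st.2.2.1 = none then some tok else st.2.2.1
    let count2 := if tok = "#" then st.1 - 1 else if tok = "c2" then st.1 + 1 else st.1
    let has := if tok = "c2" then true else st.2.1
    (count2, has, after, some tok)
  else st

def StepThree_alt (input_sequence : List String) : Int :=
  let st := input_sequence.foldl pvStepB ((1 : Int), false, none, none)
  if st.1 ≥ 1 then
    if st.2.1 = true ∧ st.2.2.2 ≠ some "c2" ∧ st.2.2.1 = some "e1" then 0 else 1
  else 0

-- ===== PRECONDITION & SPEC =====
def Spec_StepThree (input_sequence : List String) (out : Int) : Prop := out = StepThree_alt input_sequence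
instance (input_sequence : List String) (out : Int) : Decidable (Spec_StepThree input_sequence out) := by unfold Spec_StepThree; infer_instance

-- ===== CLAIM (what is proved, stated in full; the proofs are below) =====
def Claim_equal_StepThree : Prop := ∀ (input_sequence : List String), Dom_StepThree input_sequence → Spec_StepThree input_sequence (StepThree input_sequence)

-- ===== LEMMAS AND PROOFS =====

-- the segment A ends up judging: the suffix from the last 'f1'/'i2' (whole list if none)
def pvSeg (xs : List String) : List String :=
  xs.foldl (fun s t => if t = "f1" ∨ t = "i2" then [t] else s ++ [t]) []

def pvTakeU : List String → List String
  | [] => []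
  | t :: rest => if t = "f1" ∨ t = "i2" then [t] else t :: pvTakeU rest

def pvCnt (s : List String) : Int :=
  s.foldl (fun c u => if u = "#" then c - 1 else if u = "c2" then c + 1 else c) (1 : Int)

def pvAfter : List String → Option String
  | [] => none
  | t :: rest => if t = "c2" then rest.head? else pvAfter rest

def pvPhi (s : List String) : Int × Bool × Option String × Option String :=
  (pvCnt s, s.contains "c2", pvAfter s, s.getLast?)

theorem pvStepA_stuck (l : List String) (c : Int) (o : List String) (h : c ≠ 0) :
    l.foldl pvStepA (c, o) = (c, o) := by
  induction l with
  | nil => rfl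
  | cons t rest ih =>
    simp only [List.foldl_cons]
    have : pvStepA (c, o) t = (c, o) := by simp [pvStepA, h]
    rw [this, ih]

theorem pvStepA_takeU (l : List String) (o0 : List String) :
    (l.foldl pvStepA ((0 : Int), o0)).2 = o0 ++ pvTakeU l := by
  induction l generalizing o0 with
  | nil => simp [pvTakeU]
  | cons t rest ih =>
    by_cases hm : t = "f1" ∨ t = "i2"
    · have hstep : pvStepA ((0 : Int), o0) t = (1, o0 ++ [t]) := by
        rcases hm with h | h <;> simp [pvStepA, h]
      simp only [List.foldl_cons, hstep, pvStepA_stuck rest 1 (o0 ++ [t]) (by norm_num)]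
      simp [pvTakeU, hm]
    · have hstep : pvStepA ((0 : Int), o0) t = (0, o0 ++ [t]) := by
        simp [pvStepA, hm]
        push_neg at hm
        simp [hm.1, hm.2]
      simp only [List.foldl_cons, hstep, ih]
      simp [pvTakeU, hm]

theorem pvSeg_append (l : List String) (t : String) :
    pvSeg (l ++ [t]) = if t = "f1" ∨ t = "i2" then [t] else pvSeg l ++ [t] := by
  simp [pvSeg, List.foldl_append]

theorem pvTakeU_rev (xs : List String) : (pvTakeU xs.reverse).reverse = pvSeg xs := by
  induction xs using List.reverseRecOn with
  | nil => rfl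
  | append_singleton l t ih =>
    rw [pvSeg_append]
    have : (l ++ [t]).reverse = t :: l.reverse := by simp
    rw [this]
    by_cases hm : t = "f1" ∨ t = "i2"
    · simp [pvTakeU, hm]
    · simp [pvTakeU, hm, ih]

theorem pvFilter_foldl (xs : List String) (a0 : List String) :
    xs.foldl (fun acc u => if pvRel u then acc ++ [u] else acc) a0
      = a0 ++ xs.filter (fun u => pvRel u) := by
  induction xs generalizing a0 with
  | nil => simp
  | cons t rest ih =>
    by_cases h : pvRel t <;> simp [List.filter_cons, h, ih]

theorem pvStepB_skip (xs : List String) (s : Int × Bool × Option String × Option String) :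
    xs.foldl pvStepB s = (xs.filter (fun u => pvRel u)).foldl pvStepB s := by
  induction xs generalizing s with
  | nil => rfl
  | cons t rest ih =>
    by_cases h : pvRel t
    · simp [List.filter_cons, h, ih]
    · have hstep : pvStepB s t = s := by
        simp only [pvRel, Bool.or_eq_true, beq_iff_eq] at h
        push_neg at h
        simp [pvStepB, h]
      simp [List.filter_cons, h, List.foldl_cons, hstep, ih]

theorem pvAfter_none_of_not_mem (s : List String) (h : "c2" ∉ s) : pvAfter s = none := by
  induction s with
  | nil => rfl
  | cons a rest ih =>
    simp only [List.mem_cons, not_or] at h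
    simp [pvAfter, Ne.symm h.1, ih h.2]

theorem pvAfter_append (s : List String) (t : String) :
    pvAfter (s ++ [t]) = if "c2" ∈ s then some ((pvAfter s).getD t) else none := by
  induction s with
  | nil => simp [pvAfter]
  | cons a rest ih =>
    by_cases ha : a = "c2"
    · subst ha
      simp only [List.cons_append, pvAfter, if_pos rfl]
      cases rest <;> simp
    · simp [pvAfter, ha, ih, Ne.symm ha]

theorem pvCnt_append (s : List String) (t : String) :
    pvCnt (s ++ [t]) = if t = "#" then pvCnt s - 1 else if t = "c2" then pvCnt s + 1 else pvCnt s := by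
  simp [pvCnt, List.foldl_append]

theorem pvStepB_hom (s : List String) (t : String) (h : pvRel t = true) :
    pvStepB (pvPhi s) t = pvPhi (if t = "f1" ∨ t = "i2" then [t] else s ++ [t]) := by
  have hmem : "c2" ∈ s ∨ "c2" ∉ s := Decidable.em _
  simp only [pvRel, Bool.or_eq_true, beq_iff_eq] at h
  rcases h with ((((h|h)|h)|h)|h) <;> subst h
  · rfl
  · rfl
  all_goals {
    rcases hmem with hc | hc
    · rcases ho : pvAfter s with _ | x <;>
        simp [pvStepB, pvPhi, pvCnt_append, pvAfter_append, hc, ho, List.getLast?_append]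
    · simp [pvStepB, pvPhi, pvCnt_append, pvAfter_append, hc,
        pvAfter_none_of_not_mem s hc, List.getLast?_append]
  }

theorem pvStepB_phi (ys : List String) (h : ∀ t ∈ ys, pvRel t = true) :
    ys.foldl pvStepB ((1 : Int), false, none, none) = pvPhi (pvSeg ys) := by
  induction ys using List.reverseRecOn with
  | nil => rfl
  | append_singleton l t ih =>
    have hl : ∀ u ∈ l, pvRel u = true := fun u hu => h u (by simp [hu])
    have ht : pvRel t = true := h t (by simp)
    rw [List.foldl_append, List.foldl_cons, List.foldl_nil, ih hl,
      pvStepB_hom _ _ ht, pvSeg_append]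

theorem pvIndex_bind_after (s : List String) :
    ((PySem.List.index? s "c2").bind (fun i => PySem.List.pyGet? s ((i : Int) + 1))) = pvAfter s := by
  induction s with
  | nil => simp [pvAfter, PySem.List.index?]
  | cons a rest ih =>
    by_cases ha : a = "c2"
    · subst ha
      rw [PySem.List.index?_cons_self]
      have : ((0 : Nat) : Int) + 1 = ((1 : Nat) : Int) := by norm_num
      simp only [Option.bind_some, this, PySem.List.pyGet?_natCast, pvAfter, if_pos rfl]
      cases rest <;> simp
    · rw [PySem.List.index?_cons_of_ne rest ha]
      rw [Option.bind_map]
      have : ∀ i : Nat, PySem.List.pyGet? (a :: rest) (((i + 1 : Nat) : Int) + 1)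
          = PySem.List.pyGet? rest ((i : Int) + 1) := by
        intro i
        have h1 : (((i + 1 : Nat) : Int) + 1) = ((i + 2 : Nat) : Int) := by push_cast; ring
        have h2 : ((i : Int) + 1) = ((i + 1 : Nat) : Int) := by push_cast; ring
        rw [h1, h2, PySem.List.pyGet?_natCast, PySem.List.pyGet?_natCast]
        simp
      simp only [Function.comp_def, this, ih, pvAfter, if_neg ha]

-- ===== VERDICT (by name: the statement is the Claim_ definition above) =====
theorem StepThree_spec : Claim_equal_StepThree := by
  intro xs _
  unfold Spec_StepThree StepThree StepThree_alt
  simp only [PySem.List.slice?_none_none_neg_one, Option.getD_some]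
  rw [pvFilter_foldl xs [], List.nil_append]
  set ys := xs.filter (fun u => pvRel u) with hys
  have hall : ∀ t ∈ ys, pvRel t = true := fun t ht => (List.mem_filter.mp ht).2
  rw [pvStepB_skip, ← hys, pvStepB_phi ys hall]
  rw [pvStepA_takeU, List.nil_append, pvTakeU_rev]
  set s := pvSeg ys with hs
  show _ = (if (pvPhi s).1 ≥ 1 then _ else _)
  simp only [pvPhi]
  show (if pvCnt s ≥ 1 then _ else _) = _
  by_cases h1 : pvCnt s ≥ 1
  · simp only [if_pos h1]
    have hcond : ("c2" ∈ s ∧ PySem.List.pyGet? s (-1) ≠ some "c2" ∧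
        ((PySem.List.index? s "c2").bind (fun i => PySem.List.pyGet? s ((i : Int) + 1))) = some "e1")
        ↔ (s.contains "c2" = true ∧ s.getLast? ≠ some "c2" ∧ pvAfter s = some "e1") := by
      rw [PySem.List.pyGet?_neg_one, pvIndex_bind_after]
      simp
    by_cases h2 : "c2" ∈ s ∧ PySem.List.pyGet? s (-1) ≠ some "c2" ∧
        ((PySem.List.index? s "c2").bind (fun i => PySem.List.pyGet? s ((i : Int) + 1))) = some "e1"
    · rw [if_pos h2, if_pos (hcond.mp h2)]
    · rw [if_neg h2, if_neg (fun hb => h2 (hcond.mpr hb))]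
  · simp only [if_neg h1]
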